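-- pv_equiv track=rewrite | github.com/Florisheinen1/knor | optimization_profiler.py | find_best_subset_optimization
-- ===== SOURCE A (Python) =====
-- def find_best_subset_optimization(optimizations: list[dict], wanted_args: list[str]) -> dict | None:
-- 	""" Goes through given optimizations, and finds the best one
-- 		that can serve as a base for the wanted optimization.\n
-- 		Example -> Solution1 has following optimizations:\n
-- 			- ('A')
-- 			- ('A', 'B')
-- 		If target optimization is ('A', 'C'), this function should return the optimization
-- 		with 'A', as now only the 'C' optimization has to be done, reusing previously
-- 		calculated data.\n
-- 		Returns None if no subset of given optimization could be found
-- 		"""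
-- 	most_similar_optimization = None
--
-- 	for optimization in optimizations:
-- 		used_args = optimization["args_used"]
-- 		# If more used args then wanted, this optimization is of no use
-- 		if len(used_args) > len(wanted_args): continue
--
-- 		found_inconsistency = False
-- 		for i in range(len(used_args)):
-- 			# If we encounter different argument, this optimization is not a subset
-- 			if wanted_args[i] != used_args[i]:
-- 				found_inconsistency = True
-- 				break
--
-- 		# If we looped through entire used_args, this optimization is a subset
-- 		if not found_inconsistency:
-- 			# If we do not have one yet, set it
-- 			if not most_similar_optimization: most_similar_optimization = optimization
-- 			# If we looped through all wanted args as well, this is exactly the same optimization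
-- 			elif len(used_args) > len(most_similar_optimization["args_used"]):
-- 				most_similar_optimization = optimization
--
-- 				if used_args == wanted_args: break
-- 	return most_similar_optimization
-- ===== SOURCE B (Python) =====
-- def find_best_subset_optimization(optimizations: list[dict], wanted_args: list[str]) -> dict | None:
--     """Index the optimizations by their exact args tuple (first occurrence wins),
--     then probe the prefixes of wanted_args from longest to shortest and return
--     the first hit: the longest prefix present is exactly the best base."""
--     index = {}
--     for opt in optimizations:
--         key = tuple(opt["args_used"])
--         if key not in index:
--             index[key] = opt
--     for length in range(len(wanted_args), -1, -1):
--         hit = index.get(tuple(wanted_args[:length]))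
--         if hit is not None:
--             return hit
--     return None
-- ===== Notes on version B (the rewrite author's own statement) =====
-- stated objective: alternative
-- what changed: Replaces A's single accumulating scan (inline element-wise prefix check plus running longest-so-far with early break) by a hash index keyed by the exact args tuple (first occurrence wins) that is then probed with the prefixes of wanted_args from longest to shortest, returning the first hit; no prefix comparison or maximum tracking remains.
import Mathlib
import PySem

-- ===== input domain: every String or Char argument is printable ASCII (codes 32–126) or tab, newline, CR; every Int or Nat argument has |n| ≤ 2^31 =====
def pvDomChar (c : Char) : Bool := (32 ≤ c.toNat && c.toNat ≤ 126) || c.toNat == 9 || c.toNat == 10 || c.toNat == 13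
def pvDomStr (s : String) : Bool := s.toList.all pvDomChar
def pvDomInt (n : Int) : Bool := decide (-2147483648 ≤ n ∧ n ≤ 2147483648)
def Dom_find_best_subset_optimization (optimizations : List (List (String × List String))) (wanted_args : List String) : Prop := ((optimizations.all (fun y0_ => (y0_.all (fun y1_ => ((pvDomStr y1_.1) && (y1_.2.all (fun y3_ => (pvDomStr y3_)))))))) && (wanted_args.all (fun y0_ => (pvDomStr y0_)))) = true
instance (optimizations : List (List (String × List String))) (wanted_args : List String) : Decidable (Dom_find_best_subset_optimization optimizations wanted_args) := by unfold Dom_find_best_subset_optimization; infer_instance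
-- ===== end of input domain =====

-- B replaces A's accumulating scan (inline prefix check, running longest-so-far, early break)
-- by a hash index keyed by the exact args list (first occurrence wins), probed with the
-- prefixes of wanted_args from longest to shortest; first hit wins: alternative algorithm.

-- ===== PORT A =====
-- optimization["args_used"]: first-match association-list lookup; the [] default is only
-- reached outside Pre_ (where the Python raises KeyError).
def pvArgsA (o : List (String × List String)) : List String := (o.lookup "args_used").getD []

-- the inner 'for i in range(len(used_args))' loop; the (_ :: _, []) case is unreachable under the
-- preceding length guard (Python would raise IndexError there)
def pvFoundInc : List String → List String → Bool
  | [], _ => false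
  | _ :: _, [] => true
  | u :: us, w :: ws => if w ≠ u then true else pvFoundInc us ws

def pvGoA (wanted : List String) (opts : List (List (String × List String)))
    (best : Option (List (String × List String))) : Option (List (String × List String)) :=
  match opts with
  | [] => best
  | o :: rest =>
    let used := pvArgsA o
    if used.length > wanted.length then pvGoA wanted rest best
    else if pvFoundInc used wanted then pvGoA wanted rest best
    else
      match best with
      | none => pvGoA wanted rest (some o)
      | some b =>
        if used.length > (pvArgsA b).length then
          if used = wanted then some o else pvGoA wanted rest (some o)
        else pvGoA wanted rest best

def find_best_subset_optimization (optimizations : List (List (String × List String))) (wanted_args : List String) : Option (List (String × List String)) :=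
  pvGoA wanted_args optimizations none

-- ===== PORT B =====
def pvArgsB (o : List (String × List String)) : List String := (o.lookup "args_used").getD []

-- index = {}; for opt in optimizations: if key not in index: index[key] = opt
def pvIndexB (optimizations : List (List (String × List String))) :
    PySem.Dict (List String) (List (String × List String)) :=
  optimizations.foldl
    (fun d o => if d.contains (pvArgsB o) then d else d.insert (pvArgsB o) o)
    PySem.Dict.empty

-- for length in range(len(wanted_args), -1, -1): hit = index.get(wanted_args[:length]); …
-- (wanted_args[:length] with 0 ≤ length ≤ len(wanted_args) is exactly List.take)
def pvProbeB (d : PySem.Dict (List String) (List (String × List String))) (wanted : List String) :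
    Nat → Option (List (String × List String))
  | 0 => d.get? (wanted.take 0)
  | l + 1 =>
    match d.get? (wanted.take (l + 1)) with
    | some hit => some hit
    | none => pvProbeB d wanted l

def find_best_subset_optimization_alt (optimizations : List (List (String × List String))) (wanted_args : List String) : Option (List (String × List String)) :=
  pvProbeB (pvIndexB optimizations) wanted_args wanted_args.length

-- ===== PRECONDITION & SPEC =====
-- Pre_ excludes inputs containing an optimization without the "args_used" key: on those the
-- Python A raises KeyError — except when an earlier exact match breaks A's loop first, in which
-- case A returns but B's index-building pass still raises KeyError, so neither value is claimable.
def Pre_find_best_subset_optimization (optimizations : List (List (String × List String))) (wanted_args : List String) : Prop :=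
  ∀ o ∈ optimizations, o.lookup "args_used" ≠ none
instance (optimizations : List (List (String × List String))) (wanted_args : List String) : Decidable (Pre_find_best_subset_optimization optimizations wanted_args) := by unfold Pre_find_best_subset_optimization; infer_instance

def pvWitness_find_best_subset_optimization : (List (List (String × List String))) × List String :=
  ([[("args_used", ["A"])], [("args_used", ["A", "B"])]], ["A", "C"])

def Spec_find_best_subset_optimization (optimizations : List (List (String × List String))) (wanted_args : List String) (out : Option (List (String × List String))) : Prop := out = find_best_subset_optimization_alt optimizations wanted_args
instance (optimizations : List (List (String × List String))) (wanted_args : List String) (out : Option (List (String × List String))) : Decidable (Spec_find_best_subset_optimization optimizations wanted_args out) := by unfold Spec_find_best_subset_optimization; infer_instance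

-- ===== CLAIM (what is proved, stated in full; the proofs are below) =====
def Claim_equal_find_best_subset_optimization : Prop := ∀ (optimizations : List (List (String × List String))) (wanted_args : List String), Dom_find_best_subset_optimization optimizations wanted_args → Pre_find_best_subset_optimization optimizations wanted_args → Spec_find_best_subset_optimization optimizations wanted_args (find_best_subset_optimization optimizations wanted_args)

-- ===== LEMMAS AND PROOFS =====

-- "o is a candidate": its args list is a prefix of wanted (proof-only helper)
def pvCandB (wanted : List String) (o : List (String × List String)) : Bool :=
  pvArgsB o == wanted.take (pvArgsB o).length

-- the step of A's best-update, as a fold step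
def pvMStep (acc : Option (List (String × List String))) (o : List (String × List String)) :
    Option (List (String × List String)) :=
  match acc with
  | none => some o
  | some m => if (pvArgsB m).length < (pvArgsB o).length then some o else some m

-- "first element of maximal args-length", computed back-to-front
def pvBestL : List (List (String × List String)) → Option (List (String × List String))
  | [] => none
  | o :: rest =>
    match pvBestL rest with
    | none => some o
    | some b => if (pvArgsB o).length < (pvArgsB b).length then some b else some o

-- spec form of B's probe loop: the dict lookup replaced by first-match search in the list
def pvPS (opts : List (List (String × List String))) (wanted : List String) :
    Nat → Option (List (String × List String))
  | 0 => opts.find? (fun o => pvArgsB o == wanted.take 0)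
  | l + 1 =>
    match opts.find? (fun o => pvArgsB o == wanted.take (l + 1)) with
    | some hit => some hit
    | none => pvPS opts wanted l

theorem pvArgsA_eq_B (o : List (String × List String)) : pvArgsA o = pvArgsB o := rfl

-- unfolding equations for A's loop
theorem pvGoA_cons_none (wanted : List String) (o : List (String × List String))
    (rest : List (List (String × List String))) :
    pvGoA wanted (o :: rest) none =
      (if (pvArgsA o).length > wanted.length then pvGoA wanted rest none
       else if pvFoundInc (pvArgsA o) wanted then pvGoA wanted rest none
       else pvGoA wanted rest (some o)) := rfl

theorem pvGoA_cons_some (wanted : List String) (o b : List (String × List String))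
    (rest : List (List (String × List String))) :
    pvGoA wanted (o :: rest) (some b) =
      (if (pvArgsA o).length > wanted.length then pvGoA wanted rest (some b)
       else if pvFoundInc (pvArgsA o) wanted then pvGoA wanted rest (some b)
       else if (pvArgsA o).length > (pvArgsA b).length then
         (if pvArgsA o = wanted then some o else pvGoA wanted rest (some o))
       else pvGoA wanted rest (some b)) := rfl

-- A's length guard + inner mismatch loop characterise the prefix relation
theorem pvFoundInc_iff (u w : List String) :
    (u.length ≤ w.length ∧ pvFoundInc u w = false) ↔ u = w.take u.length := by
  induction u generalizing w with
  | nil => simp [pvFoundInc]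
  | cons a us ih =>
    cases w with
    | nil => simp [pvFoundInc]
    | cons b ws =>
      by_cases hab : b = a
      · subst hab
        simpa [pvFoundInc, Nat.succ_le_succ_iff] using ih ws
      · have h1 : pvFoundInc (a :: us) (b :: ws) = true := by simp [pvFoundInc, hab]
        constructor
        · intro h
          rw [h1] at h
          cases h.2
        · intro h
          rw [List.length_cons, List.take_succ_cons] at h
          injection h with h2 _
          exact absurd h2.symm hab

theorem pvCandB_iff (wanted : List String) (o : List (String × List String)) :
    pvCandB wanted o = true ↔ pvArgsB o = wanted.take (pvArgsB o).length := by
  simp [pvCandB]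

theorem pvCandB_len_le (wanted : List String) (o : List (String × List String))
    (h : pvCandB wanted o = true) : (pvArgsB o).length ≤ wanted.length := by
  have h1 := (pvCandB_iff wanted o).mp h
  have h2 : (pvArgsB o).length = min (pvArgsB o).length wanted.length := by
    conv_lhs => rw [h1]
    simp
  omega

-- once the accumulator's args are as long as every remaining candidate's, the fold is stuck
theorem pvFoldl_stuck (l : List (List (String × List String))) (c : List (String × List String))
    (h : ∀ o ∈ l, (pvArgsB o).length ≤ (pvArgsB c).length) :
    l.foldl pvMStep (some c) = some c := by
  induction l with
  | nil => rfl
  | cons o rest ih =>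
    have ho := h o (by simp)
    have hstep : pvMStep (some c) o = some c := by
      simp [pvMStep, Nat.not_lt.mpr ho]
    rw [List.foldl_cons, hstep]
    exact ih (fun x hx => h x (by simp [hx]))

-- A's loop over any accumulator equals the fold over the filtered candidates
theorem pvGoA_eq (wanted : List String) (opts : List (List (String × List String)))
    (acc : Option (List (String × List String))) :
    pvGoA wanted opts acc = (opts.filter (pvCandB wanted)).foldl pvMStep acc := by
  induction opts generalizing acc with
  | nil => rfl
  | cons o rest ih =>
    by_cases hc : pvCandB wanted o = true
    · have htake := (pvCandB_iff wanted o).mp hc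
      have hinc := (pvFoundInc_iff (pvArgsB o) wanted).mpr htake
      have hle : (pvArgsB o).length ≤ wanted.length := hinc.1
      have hng : ¬ (pvArgsA o).length > wanted.length := by
        rw [pvArgsA_eq_B]; omega
      have hi : pvFoundInc (pvArgsA o) wanted = false := by
        rw [pvArgsA_eq_B]; exact hinc.2
      have hfilter : (o :: rest).filter (pvCandB wanted) = o :: rest.filter (pvCandB wanted) := by
        simp [hc]
      rw [hfilter, List.foldl_cons]
      cases acc with
      | none =>
        rw [pvGoA_cons_none, if_neg hng, hi]
        simp only [Bool.false_eq_true, if_false]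
        show pvGoA wanted rest (some o) = (rest.filter (pvCandB wanted)).foldl pvMStep (some o)
        exact ih (some o)
      | some b =>
        rw [pvGoA_cons_some, if_neg hng, hi]
        simp only [Bool.false_eq_true, if_false]
        by_cases hlt : (pvArgsA o).length > (pvArgsA b).length
        · rw [if_pos hlt]
          have hmstep : pvMStep (some b) o = some o := by
            simp only [pvMStep, if_pos (show (pvArgsB b).length < (pvArgsB o).length by
              rw [← pvArgsA_eq_B, ← pvArgsA_eq_B]; omega)]
          rw [hmstep]
          by_cases heq : pvArgsA o = wanted
          · rw [if_pos heq]
            refine (pvFoldl_stuck _ o ?_).symm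
            intro x hx
            have hxle := pvCandB_len_le wanted x (List.of_mem_filter hx)
            have holen : (pvArgsB o).length = wanted.length := by
              rw [← pvArgsA_eq_B, heq]
            omega
          · rw [if_neg heq]
            exact ih (some o)
        · rw [if_neg hlt]
          have hmstep : pvMStep (some b) o = some b := by
            simp only [pvMStep, if_neg (show ¬ (pvArgsB b).length < (pvArgsB o).length by
              rw [← pvArgsA_eq_B, ← pvArgsA_eq_B]; omega)]
          rw [hmstep]
          exact ih (some b)
    · have hfilter : (o :: rest).filter (pvCandB wanted) = rest.filter (pvCandB wanted) := by
        simp [hc]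
      have hnot : ¬ ((pvArgsB o).length ≤ wanted.length ∧ pvFoundInc (pvArgsB o) wanted = false) := by
        intro h
        exact hc ((pvCandB_iff wanted o).mpr ((pvFoundInc_iff _ _).mp h))
      rw [hfilter]
      cases acc with
      | none =>
        rw [pvGoA_cons_none]
        by_cases hlen : (pvArgsA o).length > wanted.length
        · rw [if_pos hlen]; exact ih none
        · have hi : pvFoundInc (pvArgsA o) wanted = true := by
            rcases Bool.eq_false_or_eq_true (pvFoundInc (pvArgsA o) wanted) with h | h
            · exact h
            · exact absurd ⟨by rw [← pvArgsA_eq_B]; omega, by rw [← pvArgsA_eq_B]; exact h⟩ hnot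
          rw [if_neg hlen, hi]
          simp only [if_true]
          exact ih none
      | some b =>
        rw [pvGoA_cons_some]
        by_cases hlen : (pvArgsA o).length > wanted.length
        · rw [if_pos hlen]; exact ih (some b)
        · have hi : pvFoundInc (pvArgsA o) wanted = true := by
            rcases Bool.eq_false_or_eq_true (pvFoundInc (pvArgsA o) wanted) with h | h
            · exact h
            · exact absurd ⟨by rw [← pvArgsA_eq_B]; omega, by rw [← pvArgsA_eq_B]; exact h⟩ hnot
          rw [if_neg hlen, hi]
          simp only [if_true]
          exact ih (some b)

-- unfolding equation for pvBestL on a cons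
theorem pvBestL_cons (o : List (String × List String))
    (rest : List (List (String × List String))) :
    pvBestL (o :: rest) =
      (match pvBestL rest with
       | none => some o
       | some b => if (pvArgsB o).length < (pvArgsB b).length then some b else some o) := rfl

-- the left fold with strict-greater update equals the back-to-front first-maximum
theorem pvFoldl_eq_bestL_some (cs : List (List (String × List String)))
    (c : List (String × List String)) :
    cs.foldl pvMStep (some c) =
      (match pvBestL cs with
       | none => some c
       | some b => if (pvArgsB c).length < (pvArgsB b).length then some b else some c) := by
  induction cs generalizing c with
  | nil => rfl
  | cons o rest ih =>
    rw [List.foldl_cons]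
    show (rest.foldl pvMStep (if (pvArgsB c).length < (pvArgsB o).length then some o else some c)) = _
    rw [pvBestL_cons]
    by_cases h : (pvArgsB c).length < (pvArgsB o).length
    · rw [if_pos h, ih o]
      cases hr : pvBestL rest with
      | none => simp [h]
      | some b =>
        by_cases hb : (pvArgsB o).length < (pvArgsB b).length
        · have : (pvArgsB c).length < (pvArgsB b).length := by omega
          simp [hb, this]
        · simp [hb, h]
    · rw [if_neg h, ih c]
      cases hr : pvBestL rest with
      | none => simp [h]
      | some b =>
        by_cases hb : (pvArgsB o).length < (pvArgsB b).length
        · simp [hb]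
        · have h1 : ¬ (pvArgsB c).length < (pvArgsB b).length := by omega
          simp [hb, h1, h]

theorem pvFoldl_eq_bestL (cs : List (List (String × List String))) :
    cs.foldl pvMStep none = pvBestL cs := by
  cases cs with
  | nil => rfl
  | cons o rest =>
    rw [List.foldl_cons]
    show rest.foldl pvMStep (some o) = _
    rw [pvFoldl_eq_bestL_some, pvBestL_cons]

-- the index built by B answers get? with the FIRST optimization having those exact args
theorem pvIndex_get_aux (opts : List (List (String × List String)))
    (d : PySem.Dict (List String) (List (String × List String))) (k : List String) :
    (opts.foldl
      (fun d o => if d.contains (pvArgsB o) then d else d.insert (pvArgsB o) o) d).get? k =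
      ((d.get? k).or (opts.find? (fun o => pvArgsB o == k))) := by
  induction opts generalizing d with
  | nil => simp
  | cons o rest ih =>
    rw [List.foldl_cons, ih]
    by_cases hk : pvArgsB o = k
    · subst hk
      rw [List.find?_cons_of_pos (by simp)]
      cases hg : d.get? (pvArgsB o) with
      | some v =>
        have hcont : d.contains (pvArgsB o) = true := by
          rw [PySem.Dict.contains_eq_isSome_get?, hg]; rfl
        rw [if_pos hcont, hg]
        rfl
      | none =>
        have hcont : d.contains (pvArgsB o) = false := by
          rw [PySem.Dict.contains_eq_isSome_get?, hg]; rfl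
        rw [if_neg (by simp [hcont]), PySem.Dict.get?_insert_self]
        rfl
    · rw [List.find?_cons_of_neg (by simp [hk])]
      by_cases hcont : d.contains (pvArgsB o) = true
      · rw [if_pos hcont]
      · rw [if_neg hcont, PySem.Dict.get?_insert_of_ne d o (fun h => hk h.symm)]

theorem pvIndex_get (opts : List (List (String × List String))) (k : List String) :
    (pvIndexB opts).get? k = opts.find? (fun o => pvArgsB o == k) := by
  unfold pvIndexB
  rw [pvIndex_get_aux]
  simp

-- B's probe over the index equals the probe-by-first-match spec
theorem pvProbe_eq_PS (opts : List (List (String × List String))) (wanted : List String)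
    (l : Nat) : pvProbeB (pvIndexB opts) wanted l = pvPS opts wanted l := by
  induction l with
  | zero => unfold pvProbeB pvPS; rw [pvIndex_get]
  | succ l ih => unfold pvProbeB pvPS; rw [pvIndex_get, ih]

-- unfolding equations for the probe spec
theorem pvPS_zero (opts : List (List (String × List String))) (wanted : List String) :
    pvPS opts wanted 0 = opts.find? (fun o => pvArgsB o == wanted.take 0) := rfl

theorem pvPS_succ (opts : List (List (String × List String))) (wanted : List String) (l : Nat) :
    pvPS opts wanted (l + 1) =
      (match opts.find? (fun o => pvArgsB o == wanted.take (l + 1)) with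
       | some hit => some hit
       | none => pvPS opts wanted l) := rfl

-- anything the probe returns at level l has args a prefix of wanted of length ≤ l
theorem pvPS_len (opts : List (List (String × List String))) (wanted : List String) (l : Nat)
    (hl : l ≤ wanted.length) (b : List (String × List String))
    (hb : pvPS opts wanted l = some b) :
    pvArgsB b = wanted.take (pvArgsB b).length ∧ (pvArgsB b).length ≤ l := by
  induction l with
  | zero =>
    rw [pvPS_zero] at hb
    have heq : pvArgsB b = wanted.take 0 := by simpa using List.find?_some hb
    constructor
    · rw [heq]; simp
    · rw [heq]; simp
  | succ l ih =>
    rw [pvPS_succ] at hb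
    cases hf : opts.find? (fun o => pvArgsB o == wanted.take (l + 1)) with
    | some hit =>
      rw [hf] at hb
      have hbe : hit = b := by injection hb
      have heq : pvArgsB b = wanted.take (l + 1) := by
        rw [← hbe]; simpa using List.find?_some hf
      have hlen : (pvArgsB b).length = l + 1 := by
        rw [heq, List.length_take]; omega
      constructor
      · rw [hlen]; exact heq
      · omega
    | none =>
      rw [hf] at hb
      have := ih (by omega) hb
      exact ⟨this.1, by omega⟩

-- a non-candidate head is transparent to the probe
theorem pvPS_skip (opts : List (List (String × List String))) (wanted : List String)
    (o : List (String × List String)) (l : Nat) (hl : l ≤ wanted.length)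
    (hnc : pvArgsB o ≠ wanted.take (pvArgsB o).length) :
    pvPS (o :: opts) wanted l = pvPS opts wanted l := by
  have hkey : ∀ L, L ≤ wanted.length → ¬ ((pvArgsB o == wanted.take L) = true) := by
    intro L hL h
    rw [beq_iff_eq] at h
    apply hnc
    have : (pvArgsB o).length = L := by rw [h, List.length_take]; omega
    rw [this]; exact h
  induction l with
  | zero =>
    have hfc : List.find? (fun o' => pvArgsB o' == wanted.take 0) (o :: opts) =
        List.find? (fun o' => pvArgsB o' == wanted.take 0) opts :=
      List.find?_cons_of_neg (hkey 0 (by omega))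
    rw [pvPS_zero, pvPS_zero, hfc]
  | succ l ih =>
    have hfc : List.find? (fun o' => pvArgsB o' == wanted.take (l + 1)) (o :: opts) =
        List.find? (fun o' => pvArgsB o' == wanted.take (l + 1)) opts :=
      List.find?_cons_of_neg (hkey (l + 1) hl)
    rw [pvPS_succ, pvPS_succ, hfc]
    cases opts.find? (fun o' => pvArgsB o' == wanted.take (l + 1)) with
    | some hit => rfl
    | none => exact ih (by omega)

-- a candidate head: the probe returns the tail's answer if strictly longer, else the head
theorem pvPS_cons (opts : List (List (String × List String))) (wanted : List String)
    (o : List (String × List String)) (l : Nat) (hl : l ≤ wanted.length)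
    (hc : pvArgsB o = wanted.take (pvArgsB o).length) (hlen : (pvArgsB o).length ≤ l) :
    pvPS (o :: opts) wanted l =
      (match pvPS opts wanted l with
       | none => some o
       | some b => if (pvArgsB o).length < (pvArgsB b).length then some b else some o) := by
  induction l with
  | zero =>
    have h0 : (pvArgsB o).length = 0 := by omega
    have hargs : pvArgsB o = wanted.take 0 := by rw [hc, h0]
    have hfp : List.find? (fun o' => pvArgsB o' == wanted.take 0) (o :: opts) = some o :=
      List.find?_cons_of_pos (by simp [hargs])
    rw [pvPS_zero, pvPS_zero, hfp]
    cases hf : opts.find? (fun o' => pvArgsB o' == wanted.take 0) with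
    | none => rfl
    | some b =>
      have heq : pvArgsB b = wanted.take 0 := by simpa using List.find?_some hf
      have hb0 : (pvArgsB b).length = 0 := by rw [heq]; simp
      simp [h0, hb0]
  | succ l ih =>
    by_cases hexact : (pvArgsB o).length = l + 1
    · -- head matches at the top level
      have hargs : pvArgsB o = wanted.take (l + 1) := by rw [hc, hexact]
      have hfp : List.find? (fun o' => pvArgsB o' == wanted.take (l + 1)) (o :: opts) = some o :=
        List.find?_cons_of_pos (by simp [hargs])
      rw [pvPS_succ, pvPS_succ, hfp]
      cases hp : (match opts.find? (fun o' => pvArgsB o' == wanted.take (l + 1)) with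
                  | some hit => some hit
                  | none => pvPS opts wanted l) with
      | none => rfl
      | some b =>
        have hp' : pvPS opts wanted (l + 1) = some b := by rw [pvPS_succ]; exact hp
        have hb := pvPS_len opts wanted (l + 1) hl b hp'
        have hno : ¬ (pvArgsB o).length < (pvArgsB b).length := by omega
        simp [hno]
    · -- head's args are shorter; it cannot match at level l+1
      have hlen' : (pvArgsB o).length ≤ l := by omega
      have hne : ¬ ((pvArgsB o == wanted.take (l + 1)) = true) := by
        intro h
        rw [beq_iff_eq] at h
        apply hexact
        rw [h, List.length_take]; omega
      have hfc : List.find? (fun o' => pvArgsB o' == wanted.take (l + 1)) (o :: opts) =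
          List.find? (fun o' => pvArgsB o' == wanted.take (l + 1)) opts :=
        List.find?_cons_of_neg hne
      rw [pvPS_succ, pvPS_succ, hfc]
      cases hf : opts.find? (fun o' => pvArgsB o' == wanted.take (l + 1)) with
      | some hit =>
        have heq : pvArgsB hit = wanted.take (l + 1) := by simpa using List.find?_some hf
        have hhl : (pvArgsB hit).length = l + 1 := by rw [heq, List.length_take]; omega
        have hlt : (pvArgsB o).length < (pvArgsB hit).length := by omega
        simp [hlt]
      | none => exact ih (by omega) hlen'

-- the probe over the whole list equals the first maximal-length candidate
theorem pvPS_eq_bestL (opts : List (List (String × List String))) (wanted : List String) :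
    pvPS opts wanted wanted.length = pvBestL (opts.filter (pvCandB wanted)) := by
  induction opts with
  | nil =>
    have hnil : ∀ l, pvPS ([] : List (List (String × List String))) wanted l = none := by
      intro l
      induction l with
      | zero => rfl
      | succ l ih => rw [pvPS_succ, List.find?_nil]; exact ih
    rw [hnil]; rfl
  | cons o rest ih =>
    by_cases hc : pvCandB wanted o = true
    · have hargs := (pvCandB_iff wanted o).mp hc
      have hlen := pvCandB_len_le wanted o hc
      rw [pvPS_cons rest wanted o wanted.length le_rfl hargs hlen, ih]
      have hfilter : (o :: rest).filter (pvCandB wanted) = o :: rest.filter (pvCandB wanted) := by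
        simp [hc]
      rw [hfilter, pvBestL_cons]
    · have hargs : pvArgsB o ≠ wanted.take (pvArgsB o).length := by
        intro h
        exact hc ((pvCandB_iff wanted o).mpr h)
      rw [pvPS_skip rest wanted o wanted.length le_rfl hargs, ih]
      have hfilter : (o :: rest).filter (pvCandB wanted) = rest.filter (pvCandB wanted) := by
        simp [hc]
      rw [hfilter]

-- ===== VERDICT (by name: the statement is the Claim_ definition above) =====
theorem find_best_subset_optimization_spec : Claim_equal_find_best_subset_optimization := by
  intro optimizations wanted_args _ _
  show find_best_subset_optimization optimizations wanted_args = find_best_subset_optimization_alt optimizations wanted_args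
  rw [find_best_subset_optimization, find_best_subset_optimization_alt, pvProbe_eq_PS,
    pvPS_eq_bestL, pvGoA_eq, pvFoldl_eq_bestL]
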